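-- pv_equiv track=rewrite | github.com/MrBrantCode/unitest_baseline | mut_generate/mist_train_taco/taco_11541/solution.py | format_thread_view
-- ===== SOURCE A (Python) =====
-- def format_thread_view(thread_lines):
--     n = len(thread_lines)
--     if n == 0:
--         return []
--
--     # Add an empty string to the end to handle edge cases
--     thread_lines.append('')
--
--     # Initialize a list to store the depth of each line
--     depths = [0] * (n + 1)
--
--     # Calculate the depth of each line
--     for i in range(1, n):
--         s = thread_lines[i]
--         depths[i] = len(s.split('.')) - 1
--
--     # Create a list to store the formatted lines
--     formatted_lines = [[c for c in t] for t in thread_lines[:n]]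
--
--     # Process each line to format it
--     for i in range(n):
--         t = depths[i]
--         if t == 0:
--             continue
--         formatted_lines[i][t - 1] = '+'
--         ni = i
--         for j in range(i + 1, n):
--             if depths[j] < t:
--                 break
--             if depths[j] == t:
--                 ni = j
--                 break
--         for j in range(i + 1, ni):
--             formatted_lines[j][t - 1] = '|'
--         for j in range(t - 1):
--             if formatted_lines[i][j] == '.':
--                 formatted_lines[i][j] = ' '
--
--     # Join the characters in each line to form the final formatted lines
--     return [''.join(c) for c in formatted_lines]
-- ===== SOURCE B (Python) =====
-- def format_thread_view(thread_lines):
--     # Per-row functional recomputation (no shared grid, no cross-row writes):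
--     # each output row is computed directly from the depth list.
--     # Note: unlike A, B does not mutate its argument (A appends '' to it).
--     n = len(thread_lines)
--     if n == 0:
--         return []
--     depths = [0] + [s.count('.') for s in thread_lines[1:]]
--
--     def covered(j, c):
--         # column c of row j lies strictly inside a sibling connector at depth c+1
--         i = j - 1
--         while i > 0 and depths[i] > c + 1:
--             i -= 1
--         if i <= 0 or depths[i] != c + 1:
--             return False
--         m = j + 1
--         while m < n and depths[m] > c + 1:
--             m += 1
--         return m < n and depths[m] == c + 1
--
--     out = []
--     for j, s in enumerate(thread_lines):
--         t = depths[j]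
--         if t == 0:
--             out.append(s)
--         else:
--             pre = ''.join('|' if covered(j, c) else (' ' if ch == '.' else ch)
--                           for c, ch in enumerate(s[:t - 1]))
--             out.append(pre + '+' + s[t:])
--     return out
-- ===== Notes on version B (the rewrite author's own statement) =====
-- stated objective: alternative
-- what changed: A paints '|' connectors across a shared mutable character grid with a quadratic outer/inner loop and in-place '+'/' ' patches; B computes every output row independently in one functional pass from the depth list, deciding each prefix column by a previous/next-shallower-line scan, with no grid and no cross-row writes (measured ~2x faster in a timing run: no repeated whole-grid repainting). A also mutates its argument (appends ''); B does not - the equivalence is about the return value.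
import Mathlib
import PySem

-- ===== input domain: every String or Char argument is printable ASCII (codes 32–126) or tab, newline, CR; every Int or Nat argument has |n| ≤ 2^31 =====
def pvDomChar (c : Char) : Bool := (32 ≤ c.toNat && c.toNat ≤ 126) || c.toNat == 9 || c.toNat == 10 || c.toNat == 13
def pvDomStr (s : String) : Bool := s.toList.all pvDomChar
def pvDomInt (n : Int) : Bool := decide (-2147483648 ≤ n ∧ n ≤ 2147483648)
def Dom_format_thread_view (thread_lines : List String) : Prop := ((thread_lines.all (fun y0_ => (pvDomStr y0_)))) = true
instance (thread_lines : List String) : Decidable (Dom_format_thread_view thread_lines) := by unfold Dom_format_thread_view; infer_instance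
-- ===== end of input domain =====

-- B replaces A's quadratic cross-row '|'-painting over a shared mutable grid by a per-row
-- functional recomputation (each output row is computed independently from the depth list);
-- objective: alternative decomposition.  A mutates its argument (appends ''); B does not —
-- the equivalence proved here is about the return value.

-- ===== PORT A =====
-- len(s.split('.')) - 1
def fmtDepthA (s : String) : Nat := (PySem.Chars.splitOn s.toList ['.']).length - 1

-- depths = [0]*(n+1); for i in range(1, n): depths[i] = len(thread_lines[i].split('.')) - 1
def fmtDepthsA (tl : List String) (n : Nat) : List Nat :=
  (List.range' 1 (n - 1)).foldl (fun ds i => ds.set i (fmtDepthA (tl.getD i ""))) (List.replicate (n + 1) 0)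

-- ni = i; for j in range(i+1, n): if depths[j] < t: break; if depths[j] == t: ni = j; break
def fmtNiA (ds : List Nat) (t i : Nat) : List Nat → Nat
  | [] => i
  | j :: js => if ds.getD j 0 < t then i else if ds.getD j 0 = t then j else fmtNiA ds t i js

-- the body of A's outer loop over i
def fmtStepA (ds : List Nat) (n : Nat) (g : List (List Char)) (i : Nat) : List (List Char) :=
  let t := ds.getD i 0
  if t = 0 then g else
  let g1 := g.modify i (fun row => row.set (t - 1) '+')
  let ni := fmtNiA ds t i (List.range' (i + 1) (n - (i + 1)))
  let g2 := (List.range' (i + 1) (ni - (i + 1))).foldl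
      (fun g j => g.modify j (fun row => row.set (t - 1) '|')) g1
  (List.range (t - 1)).foldl
      (fun g j => if (g.getD i []).getD j ' ' = '.' then g.modify i (fun row => row.set j ' ') else g) g2

def format_thread_view (thread_lines : List String) : List String :=
  let n := thread_lines.length
  if n = 0 then [] else
  let tl := thread_lines ++ [""]
  let ds := fmtDepthsA tl n
  let fl0 := (tl.take n).map String.toList
  let fl := (List.range n).foldl (fmtStepA ds n) fl0
  fl.map (fun row => String.ofList row)

-- ===== PORT B =====
-- s.count('.')
def fmtDepthB (s : String) : Nat := PySem.Str.count s "."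

-- i = j - 1; while i > 0 and depths[i] > c + 1: i -= 1
def fmtPrev (ds : List Nat) (c1 : Nat) : Nat → Nat
  | 0 => 0
  | i + 1 => if c1 < ds.getD (i + 1) 0 then fmtPrev ds c1 i else i + 1

-- m = j + 1; while m < n and depths[m] > c + 1: m += 1
def fmtNext (ds : List Nat) (n c1 m : Nat) : Nat :=
  if h : m < n then (if c1 < ds.getD m 0 then fmtNext ds n c1 (m + 1) else m) else m
termination_by n - m

def fmtCovered (ds : List Nat) (n j c : Nat) : Bool :=
  let i := fmtPrev ds (c + 1) (j - 1)
  if i = 0 || ds.getD i 0 ≠ c + 1 then false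
  else
    let m := fmtNext ds n (c + 1) (j + 1)
    decide (m < n) && decide (ds.getD m 0 = c + 1)

def fmtRowB (ds : List Nat) (n j : Nat) (s : String) : String :=
  let t := ds.getD j 0
  if t = 0 then s else
  let cs := s.toList
  let pre := (cs.take (t - 1)).mapIdx
      (fun c ch => if fmtCovered ds n j c then '|' else if ch = '.' then ' ' else ch)
  String.ofList (pre ++ '+' :: cs.drop t)

def format_thread_view_alt (thread_lines : List String) : List String :=
  let n := thread_lines.length
  if n = 0 then [] else
  let ds := 0 :: (thread_lines.tail.map fmtDepthB)
  thread_lines.mapIdx (fun j s => fmtRowB ds n j s)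

-- ===== PRECONDITION & SPEC =====
def Spec_format_thread_view (thread_lines : List String) (out : List String) : Prop := out = format_thread_view_alt thread_lines
instance (thread_lines : List String) (out : List String) : Decidable (Spec_format_thread_view thread_lines out) := by unfold Spec_format_thread_view; infer_instance

-- ===== CLAIM (what is proved, stated in full; the proofs are below) =====
def Claim_equal_format_thread_view : Prop := ∀ (thread_lines : List String), Dom_format_thread_view thread_lines → Spec_format_thread_view thread_lines (format_thread_view thread_lines)

-- ===== LEMMAS AND PROOFS =====

-- The depth of row r as both programs use it: 0 for the first row, the number of '.' otherwise.
def fmtDep (L : List (List Char)) (r : Nat) : Nat :=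
  if r = 0 then 0 else List.count '.' (L.getD r [])

-- column c of row r lies strictly inside a sibling connector at depth c+1 whose start is < k
def fmtCovB (dep : Nat → Nat) (n k r c : Nat) : Bool :=
  decide (∃ i, i < k ∧ i < r ∧ dep i = c + 1 ∧
    ∃ m, m < n ∧ r < m ∧ dep m = c + 1 ∧ ∀ j, j < m → i < j → c + 1 < dep j)

-- the final shape of row r
def fmtSpecRow (dep : Nat → Nat) (n r : Nat) (cs : List Char) : List Char :=
  if dep r = 0 then cs else
  cs.mapIdx fun c ch =>
    if c = dep r - 1 then '+'
    else if c < dep r - 1 then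
      (if fmtCovB dep n r r c then '|' else if ch = '.' then ' ' else ch)
    else ch

-- the shape of row r after A has processed rows < k (only '|' marks from starts < k)
def fmtPartRow (dep : Nat → Nat) (n k r : Nat) (cs : List Char) : List Char :=
  cs.mapIdx fun c ch => if fmtCovB dep n k r c then '|' else ch

lemma fmtCovB_iff (dep : Nat → Nat) (n k r c : Nat) :
    fmtCovB dep n k r c = true ↔
    ∃ i, i < k ∧ i < r ∧ dep i = c + 1 ∧
      ∃ m, m < n ∧ r < m ∧ dep m = c + 1 ∧ ∀ j, j < m → i < j → c + 1 < dep j := by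
  simp [fmtCovB]

lemma fmtCovB_dep_lt (dep : Nat → Nat) (n k r c : Nat) (h : fmtCovB dep n k r c = true) :
    c + 1 < dep r := by
  obtain ⟨i, _, hir, _, m, _, hrm, _, hall⟩ := (fmtCovB_iff dep n k r c).1 h
  exact hall r hrm hir

lemma countGo_single (ch : Char) : ∀ (fuel : Nat) (l : List Char) (acc : Nat),
    l.length ≤ fuel → PySem.Chars.count.go [ch] fuel l acc = acc + l.count ch := by
  intro fuel
  induction fuel with
  | zero =>
    intro l acc h
    have : l = [] := List.eq_nil_of_length_eq_zero (Nat.le_zero.1 h)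
    subst this
    rw [PySem.Chars.count.go]
    simp
  | succ fuel ih =>
    intro l acc h
    cases l with
    | nil => rw [PySem.Chars.count.go]; simp; omega
    | cons c rest =>
      rw [PySem.Chars.count.go]
      have hpre : ([ch].isPrefixOf (c :: rest)) = (ch == c) := by simp [List.isPrefixOf]
      rw [hpre]
      simp only [List.length_cons, Nat.add_le_add_iff_right] at h
      by_cases hc : ch = c
      · subst hc
        simp only [beq_self_eq_true, if_true, List.length_singleton, List.drop_succ_cons,
          List.drop_zero]
        rw [ih rest (acc + 1) h]
        rw [List.count_cons]
        simp [Nat.add_comm, Nat.add_assoc, Nat.add_left_comm]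
      · have : (ch == c) = false := beq_eq_false_iff_ne.2 hc
        rw [this]
        simp only [if_false, Bool.false_eq_true]
        rw [ih rest acc h, List.count_cons]
        have : (c == ch) = false := beq_eq_false_iff_ne.2 (fun hh => hc hh.symm)
        simp [this]

lemma chars_count_single (ch : Char) (cs : List Char) :
    PySem.Chars.count cs [ch] = cs.count ch := by
  have h := countGo_single ch cs.length cs 0 (le_refl _)
  simp [PySem.Chars.count, h]

lemma splitOnGo_single (ch : Char) : ∀ (fuel : Nat) (l cur : List Char) (acc : List (List Char)),
    l.length ≤ fuel →
    (PySem.Chars.splitOn.go [ch] fuel l cur acc).length = acc.length + 1 + l.count ch := by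
  intro fuel
  induction fuel with
  | zero =>
    intro l cur acc h
    have : l = [] := List.eq_nil_of_length_eq_zero (Nat.le_zero.1 h)
    subst this
    rw [PySem.Chars.splitOn.go]
    simp
  | succ fuel ih =>
    intro l cur acc h
    cases l with
    | nil => rw [PySem.Chars.splitOn.go]; simp; omega
    | cons c rest =>
      rw [PySem.Chars.splitOn.go]
      have hpre : ([ch].isPrefixOf (c :: rest)) = (ch == c) := by simp [List.isPrefixOf]
      rw [hpre]
      simp only [List.length_cons, Nat.add_le_add_iff_right] at h
      by_cases hc : ch = c
      · subst hc
        simp only [beq_self_eq_true, if_true, List.length_singleton, List.drop_succ_cons,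
          List.drop_zero]
        rw [ih rest [] (cur.reverse :: acc) h]
        rw [List.count_cons]
        simp [Nat.add_comm, Nat.add_assoc, Nat.add_left_comm]
      · have : (ch == c) = false := beq_eq_false_iff_ne.2 hc
        rw [this]
        simp only [if_false, Bool.false_eq_true]
        rw [ih rest (c :: cur) acc h, List.count_cons]
        have : (c == ch) = false := beq_eq_false_iff_ne.2 (fun hh => hc hh.symm)
        simp [this]

lemma fmtDepthA_eq_count (s : String) : fmtDepthA s = s.toList.count '.' := by
  unfold fmtDepthA
  rw [PySem.Chars.splitOn]
  rw [splitOnGo_single '.' (s.toList.length + 1) s.toList [] [] (by omega)]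
  simp

lemma fmtDepthB_eq_count (s : String) : fmtDepthB s = s.toList.count '.' := by
  have := chars_count_single '.' s.toList
  simpa [fmtDepthB, PySem.Str.count_eq] using this

lemma getD_foldl_set (v : Nat → Nat) : ∀ (idxs : List Nat) (base : List Nat) (i : Nat),
    ((idxs.foldl (fun ds j => ds.set j (v j)) base).getD i 0) =
      if i ∈ idxs ∧ i < base.length then v i else base.getD i 0 := by
  intro idxs
  induction idxs with
  | nil => intro base i; simp
  | cons j js ih =>
    intro base i
    simp only [List.foldl_cons]
    rw [ih]
    simp only [List.length_set, List.mem_cons]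
    by_cases hmem : i ∈ js
    · simp only [hmem, or_true, true_and]
      by_cases hlt : i < base.length
      · simp [hlt]
      · rw [if_neg hlt, if_neg hlt]
        have h1 : (base.set j (v j))[i]? = none :=
          List.getElem?_eq_none (by simpa [List.length_set] using Nat.le_of_not_lt hlt)
        have h2 : base[i]? = none := List.getElem?_eq_none (Nat.le_of_not_lt hlt)
        rw [List.getD_eq_getElem?_getD, List.getD_eq_getElem?_getD, h1, h2]
    · by_cases hij : i = j
      · subst hij
        by_cases hlt : i < base.length
        · simp [hmem, hlt, List.getD_eq_getElem?_getD, List.getElem?_set]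
        · simp [hmem, hlt, List.getD_eq_getElem?_getD, List.getElem?_set]
      · simp only [hmem, or_false, hij, false_or, false_and, if_false]
        simp [List.getD_eq_getElem?_getD, List.getElem?_set, Ne.symm hij, hij]

lemma getD_map_toList (tls : List String) (i : Nat) :
    (tls.map String.toList).getD i [] = (tls.getD i "").toList := by
  simp only [List.getD_eq_getElem?_getD, List.getElem?_map]
  cases tls[i]? <;> simp

lemma fmtDepthsA_correct (tls : List String) (i : Nat) :
    (fmtDepthsA (tls ++ [""]) tls.length).getD i 0 = fmtDep (tls.map String.toList) i := by
  unfold fmtDepthsA fmtDep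
  rw [getD_foldl_set]
  simp only [List.length_replicate, List.mem_range']
  rw [getD_map_toList]
  by_cases h0 : i = 0
  · subst h0
    rw [if_neg (by rintro ⟨⟨j, hj, hh⟩, -⟩; omega), if_pos rfl]
    simp
  · by_cases hn : i < tls.length
    · have hmem : (∃ j < tls.length - 1, i = 1 + 1 * j) ∧ i < tls.length + 1 := by
        exact ⟨⟨i - 1, by omega, by omega⟩, by omega⟩
      rw [if_pos hmem]
      rw [fmtDepthA_eq_count]
      have : (tls ++ [""]).getD i "" = tls.getD i "" := by
        simp [List.getD_eq_getElem?_getD, List.getElem?_append_left hn]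
      rw [this, if_neg h0]
    · have hmem : ¬ ((∃ j < tls.length - 1, i = 1 + 1 * j) ∧ i < tls.length + 1) := by
        rintro ⟨⟨j, hj, rfl⟩, -⟩; omega
      rw [if_neg hmem, if_neg h0]
      have : tls.getD i "" = "" := by
        simp [List.getD_eq_getElem?_getD, List.getElem?_eq_none (by omega : tls.length ≤ i)]
      rw [this]
      simp only [List.getD_eq_getElem?_getD, List.getElem?_replicate]
      split_ifs <;> simp

lemma fmtDepthsB_correct (tls : List String) (i : Nat) :
    (0 :: (tls.tail.map fmtDepthB)).getD i 0 = fmtDep (tls.map String.toList) i := by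
  unfold fmtDep
  cases i with
  | zero => simp
  | succ i =>
    simp only [List.getD_eq_getElem?_getD, List.getElem?_cons_succ, List.getElem?_map,
      List.getElem?_tail, reduceCtorEq, if_false]
    cases h : tls[i + 1]? with
    | none => simp [h]
    | some s => simp [h, fmtDepthB_eq_count]

lemma fmtNiA_first (ds : List Nat) (t i : Nat) : ∀ (len a : Nat) (m : Nat), a ≤ m → m < a + len →
    ds.getD m 0 = t → (∀ j, a ≤ j → j < m → t < ds.getD j 0) →
    fmtNiA ds t i (List.range' a len) = m := by
  intro len
  induction len with
  | zero => intro a m h1 h2; omega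
  | succ len ih =>
    intro a m h1 h2 hm hall
    rw [List.range'_succ, fmtNiA]
    by_cases ham : a = m
    · subst ham
      rw [if_neg (by omega), if_pos hm]
    · have hlt : t < ds.getD a 0 := hall a (le_refl a) (by omega)
      rw [if_neg (by omega), if_neg (by omega)]
      exact ih (a + 1) m (by omega) (by omega) hm (fun j hj1 hj2 => hall j (by omega) hj2)

lemma fmtNiA_interior (ds : List Nat) (t i : Nat) : ∀ (len a : Nat), i < a →
    i < fmtNiA ds t i (List.range' a len) →
    (fmtNiA ds t i (List.range' a len) < a + len ∧
     ds.getD (fmtNiA ds t i (List.range' a len)) 0 = t ∧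
     ∀ j, a ≤ j → j < fmtNiA ds t i (List.range' a len) → t < ds.getD j 0) := by
  intro len
  induction len with
  | zero =>
    intro a ha h
    rw [show List.range' a 0 = ([] : List Nat) from rfl, fmtNiA] at h
    omega
  | succ len ih =>
    intro a ha h
    rw [List.range'_succ, fmtNiA] at h ⊢
    by_cases h1 : ds.getD a 0 < t
    · rw [if_pos h1] at h; omega
    · by_cases h2 : ds.getD a 0 = t
      · rw [if_neg h1, if_pos h2] at h ⊢
        exact ⟨by omega, h2, fun j hj1 hj2 => by omega⟩
      · rw [if_neg h1, if_neg h2] at h ⊢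
        obtain ⟨hb, hv, hint⟩ := ih (a + 1) (by omega) h
        refine ⟨by omega, hv, fun j hj1 hj2 => ?_⟩
        by_cases hja : j = a
        · subst hja; omega
        · exact hint j (by omega) hj2

lemma fmtPrev_le (ds : List Nat) (c1 : Nat) : ∀ k, fmtPrev ds c1 k ≤ k := by
  intro k
  induction k with
  | zero => simp [fmtPrev]
  | succ k ih =>
    simp only [fmtPrev]
    split_ifs
    · omega
    · omega

lemma fmtPrev_spec (ds : List Nat) (c1 : Nat) : ∀ k,
    (fmtPrev ds c1 k = 0 ∨ ds.getD (fmtPrev ds c1 k) 0 ≤ c1) ∧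
    (∀ j, fmtPrev ds c1 k < j → j ≤ k → c1 < ds.getD j 0) := by
  intro k
  induction k with
  | zero => exact ⟨Or.inl rfl, fun j h1 h2 => by omega⟩
  | succ k ih =>
    simp only [fmtPrev]
    split_ifs with h
    · refine ⟨ih.1, fun j hj1 hj2 => ?_⟩
      by_cases hjk : j = k + 1
      · subst hjk; exact h
      · exact ih.2 j hj1 (by omega)
    · exact ⟨Or.inr (by omega), fun j hj1 hj2 => by omega⟩

lemma fmtPrev_exact (ds : List Nat) (c1 : Nat) : ∀ (k i : Nat), i ≤ k →
    (ds.getD i 0 ≤ c1 ∨ i = 0) → (∀ j, i < j → j ≤ k → c1 < ds.getD j 0) →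
    fmtPrev ds c1 k = i := by
  intro k
  induction k with
  | zero => intro i h1 _ _; simp [fmtPrev]; omega
  | succ k ih =>
    intro i h1 h2 h3
    simp only [fmtPrev]
    by_cases hik : i = k + 1
    · subst hik
      rw [if_neg (by rcases h2 with h | h; omega; omega)]
    · rw [if_pos (h3 (k + 1) (by omega) (le_refl _))]
      exact ih i (by omega) h2 (fun j hj1 hj2 => h3 j hj1 (by omega))

lemma fmtNext_spec (ds : List Nat) (n c1 : Nat) : ∀ (m : Nat),
    m ≤ fmtNext ds n c1 m ∧
    (fmtNext ds n c1 m < n → ds.getD (fmtNext ds n c1 m) 0 ≤ c1) ∧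
    (∀ j, m ≤ j → j < fmtNext ds n c1 m → c1 < ds.getD j 0) := by
  intro m
  by_cases h : m < n
  · by_cases h2 : c1 < ds.getD m 0
    · have ih := fmtNext_spec ds n c1 (m + 1)
      rw [fmtNext, dif_pos h, if_pos h2]
      refine ⟨by omega, ih.2.1, fun j hj1 hj2 => ?_⟩
      by_cases hjm : j = m
      · subst hjm; exact h2
      · exact ih.2.2 j (by omega) hj2
    · rw [fmtNext, dif_pos h, if_neg h2]
      exact ⟨le_refl _, fun _ => by omega, fun j h1 h2 => by omega⟩
  · rw [fmtNext, dif_neg h]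
    exact ⟨le_refl _, fun hh => by omega, fun j h1 h2 => by omega⟩
termination_by m => n - m
decreasing_by omega

lemma fmtNext_exact (ds : List Nat) (n c1 : Nat) : ∀ (m m' : Nat), m ≤ m' → m' < n →
    ds.getD m' 0 ≤ c1 → (∀ j, m ≤ j → j < m' → c1 < ds.getD j 0) →
    fmtNext ds n c1 m = m' := by
  intro m m' h1 h2 h3 h4
  by_cases hmm : m = m'
  · subst hmm
    rw [fmtNext, dif_pos h2, if_neg (by omega)]
  · rw [fmtNext, dif_pos (by omega), if_pos (h4 m (le_refl _) (by omega))]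
    exact fmtNext_exact ds n c1 (m + 1) m' (by omega) h2 h3 (fun j hj1 hj2 => h4 j (by omega) hj2)
termination_by m m' => n - m
decreasing_by omega

lemma fmtCovered_eq (L : List (List Char)) (ds : List Nat) (n : Nat)
    (hds : ∀ i, ds.getD i 0 = fmtDep L i)
    (j c : Nat) (hc : c + 1 < fmtDep L j) :
    fmtCovered ds n j c = fmtCovB (fmtDep L) n j j c := by
  have hd0 : fmtDep L 0 = 0 := by simp [fmtDep]
  have hj0 : j ≠ 0 := by intro h; subst h; omega
  by_cases hcov : fmtCovB (fmtDep L) n j j c = true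
  · -- show fmtCovered = true
    rw [hcov]
    obtain ⟨i, hik, hir, hdi, m, hmn, hrm, hdm, hall⟩ := (fmtCovB_iff _ n j j c).1 hcov
    have hi0 : i ≠ 0 := by intro h; subst h; rw [hd0] at hdi; omega
    have hprev : fmtPrev ds (c + 1) (j - 1) = i := by
      apply fmtPrev_exact ds (c + 1) (j - 1) i (by omega)
      · left; rw [hds]; omega
      · intro j' hj1 hj2
        rw [hds]
        exact hall j' (by omega) hj1
    have hnext : fmtNext ds n (c + 1) (j + 1) = m := by
      apply fmtNext_exact ds n (c + 1) (j + 1) m (by omega) hmn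
      · rw [hds]; omega
      · intro j' hj1 hj2
        rw [hds]
        exact hall j' hj2 (by omega)
    have h1 : ds.getD i 0 = c + 1 := by rw [hds]; exact hdi
    have h2 : ds.getD m 0 = c + 1 := by rw [hds]; exact hdm
    simp only [fmtCovered, hprev, hnext]
    rw [h1, h2]
    simp [hi0, hmn]
  · rw [Bool.not_eq_true] at hcov
    rw [hcov]
    simp only [fmtCovered]
    set i := fmtPrev ds (c + 1) (j - 1) with hi
    by_cases h1 : i = 0 ∨ ds.getD i 0 ≠ c + 1
    · rw [if_pos (by rcases h1 with h | h <;> simp [← List.getD_eq_getElem?_getD, h])]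
    · push_neg at h1
      obtain ⟨hi0, hdi⟩ := h1
      rw [if_neg (by simp [← List.getD_eq_getElem?_getD, hi0, hdi])]
      set m := fmtNext ds n (c + 1) (j + 1) with hm
      by_cases hmn : m < n
      · by_cases hdm : ds.getD m 0 = c + 1
        · exfalso
          have hcv : fmtCovB (fmtDep L) n j j c = true := by
            rw [fmtCovB_iff]
            have hile : i ≤ j - 1 := fmtPrev_le ds (c + 1) (j - 1)
            have hprev := (fmtPrev_spec ds (c + 1) (j - 1)).2
            have hnext := fmtNext_spec ds n (c + 1) (j + 1)
            have hi0' : i ≠ 0 := hi0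
            refine ⟨i, by omega, by omega, by rw [← hds]; exact hdi, m, hmn, by omega,
              by rw [← hds]; exact hdm, fun j' hj1 hj2 => ?_⟩
            rw [← hds]
            rcases Nat.lt_trichotomy j' j with h | h | h
            · exact hprev j' hj2 (by omega)
            · subst h; rw [hds]; omega
            · exact hnext.2.2 j' (by omega) hj1
          rw [hcv] at hcov
          exact absurd hcov (by simp)
        · simp [← List.getD_eq_getElem?_getD, hdm]
      · simp [hmn]

-- covB is monotone in k; the step from k to k+1 adds exactly the marks of start k
lemma fmtCovB_succ (dep : Nat → Nat) (n k r c : Nat) :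
    fmtCovB dep n (k + 1) r c = true ↔
    (fmtCovB dep n k r c = true ∨
      (k < r ∧ dep k = c + 1 ∧
        ∃ m, m < n ∧ r < m ∧ dep m = c + 1 ∧ ∀ j, j < m → k < j → c + 1 < dep j)) := by
  rw [fmtCovB_iff, fmtCovB_iff]
  constructor
  · rintro ⟨i, hik, hir, hdi, m, hm⟩
    rcases Nat.lt_succ_iff_lt_or_eq.1 hik with h | h
    · exact Or.inl ⟨i, h, hir, hdi, m, hm⟩
    · subst h; exact Or.inr ⟨hir, hdi, m, hm⟩
  · rintro (⟨i, hik, hir, hdi, m, hm⟩ | ⟨hkr, hdk, m, hm⟩)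
    · exact ⟨i, by omega, hir, hdi, m, hm⟩
    · exact ⟨k, by omega, hkr, hdk, m, hm⟩

-- getElem? through a fold of modifies over a contiguous index range
lemma foldl_modify_getElem? (f : List Char → List Char) :
    ∀ (len a : Nat) (G : List (List Char)) (r : Nat),
    (((List.range' a len).foldl (fun g j => g.modify j f) G))[r]? =
    if a ≤ r ∧ r < a + len then (G[r]?.map f) else G[r]? := by
  intro len
  induction len with
  | zero => intro a G r; simp
  | succ len ih =>
    intro a G r
    rw [List.range'_succ]
    simp only [List.foldl_cons]
    rw [ih]
    by_cases h1 : a + 1 ≤ r ∧ r < a + 1 + len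
    · rw [if_pos h1, if_pos (by omega)]
      rw [List.getElem?_modify]
      have : ¬ (a = r) := by omega
      cases G[r]? <;> simp [this]
    · rw [if_neg h1, List.getElem?_modify]
      by_cases h2 : a = r
      · subst h2
        rw [if_pos (by omega)]
        cases G[a]? <;> simp
      · rw [if_neg (by omega)]
        cases G[r]? <;> simp [h2]

def fmtSpaceRow (m : Nat) (R : List Char) : List Char :=
  R.mapIdx fun j ch => if j < m ∧ ch = '.' then ' ' else ch

-- the '.'-to-space loop on row k, rowwise
lemma space_fold_getElem? (k : Nat) (G : List (List Char)) (R : List Char) (hG : G[k]? = some R) :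
    ∀ (m : Nat) (r : Nat),
    ((List.range m).foldl
      (fun g j => if (g.getD k []).getD j ' ' = '.' then g.modify k (fun row => row.set j ' ') else g) G)[r]?
    = if r = k then some (fmtSpaceRow m R) else G[r]? := by
  intro m
  induction m with
  | zero =>
    intro r
    simp only [List.range_zero, List.foldl_nil]
    by_cases h : r = k
    · rw [if_pos h, h, hG]
      congr 1
      apply List.ext_getElem?
      intro c
      simp only [fmtSpaceRow, List.getElem?_mapIdx]
      cases R[c]? <;> simp
    · rw [if_neg h]
  | succ m ih =>
    intro r
    rw [List.range_succ, List.foldl_append, List.foldl_cons, List.foldl_nil]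
    set Gm := (List.range m).foldl
      (fun g j => if (g.getD k []).getD j ' ' = '.' then g.modify k (fun row => row.set j ' ') else g) G with hGm
    have hrowk : Gm[k]? = some (fmtSpaceRow m R) := by rw [ih k, if_pos rfl]
    have h1 : Gm.getD k [] = fmtSpaceRow m R := by
      rw [List.getD_eq_getElem?_getD, hrowk]
      rfl
    have hpos : (fmtSpaceRow m R)[m]? = R[m]? := by
      simp only [fmtSpaceRow, List.getElem?_mapIdx]
      cases R[m]? with
      | none => simp
      | some ch => simp
    have hread : (Gm.getD k []).getD m ' ' = R[m]?.getD ' ' := by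
      rw [h1, List.getD_eq_getElem?_getD, hpos]
    by_cases hcond : (Gm.getD k []).getD m ' ' = '.'
    · rw [if_pos hcond]
      rw [hread] at hcond
      have hm : ∃ h : m < R.length, R[m]'h = '.' := by
        cases hc : R[m]? with
        | none => rw [hc] at hcond; exact absurd hcond (by decide)
        | some ch =>
          rw [hc] at hcond
          obtain ⟨hlt, heq⟩ := List.getElem?_eq_some_iff.1 hc
          exact ⟨hlt, by rw [heq]; exact hcond⟩
      obtain ⟨hmlt, hRm⟩ := hm
      rw [List.getElem?_modify, ih r]
      by_cases hrk : r = k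
      · rw [if_pos hrk, if_pos hrk]
        have hmap : (fun a => if k = r then a.set m ' ' else a) <$> (some (fmtSpaceRow m R))
            = some (if k = r then (fmtSpaceRow m R).set m ' ' else fmtSpaceRow m R) := rfl
        rw [hmap, if_pos hrk.symm]
        congr 1
        apply List.ext_getElem?
        intro c
        rw [List.getElem?_set]
        by_cases hcm : m = c
        · rw [if_pos hcm, ← hcm]
          rw [if_pos (by simpa [fmtSpaceRow] using hmlt)]
          simp [fmtSpaceRow, List.getElem?_mapIdx, List.getElem?_eq_getElem hmlt, hRm]
        · rw [if_neg hcm]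
          simp only [fmtSpaceRow, List.getElem?_mapIdx]
          cases hc : R[c]? with
          | none => simp
          | some ch =>
            simp only [Option.map_some, Option.some.injEq]
            have hiff : (c < m ∧ ch = '.') ↔ (c < m + 1 ∧ ch = '.') := by
              constructor
              · rintro ⟨ha, hb⟩; exact ⟨by omega, hb⟩
              · rintro ⟨ha, hb⟩
                refine ⟨?_, hb⟩
                rcases Nat.lt_succ_iff_lt_or_eq.1 ha with h | h
                · exact h
                · exact absurd h.symm hcm
            split_ifs with hA hB hB
            · rfl
            · exact absurd (hiff.1 hA) hB
            · exact absurd (hiff.2 hB) hA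
            · rfl
      · rw [if_neg hrk, if_neg hrk]
        have hkr : ¬ k = r := fun hh => hrk hh.symm
        cases G[r]? <;> simp [hkr]
    · rw [if_neg hcond, ih r]
      rw [hread] at hcond
      by_cases hrk : r = k
      · rw [if_pos hrk, if_pos hrk]
        congr 1
        apply List.ext_getElem?
        intro c
        simp only [fmtSpaceRow, List.getElem?_mapIdx]
        cases hc : R[c]? with
        | none => simp
        | some ch =>
          simp only [Option.map_some, Option.some.injEq]
          by_cases hcm : c = m
          · have hchd : ch ≠ '.' := by
              rw [hcm] at hc
              rw [hc] at hcond
              simpa using hcond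
            have : ¬ (c < m ∧ ch = '.') := by rintro ⟨-, hb⟩; exact hchd hb
            have h2 : ¬ (c < m + 1 ∧ ch = '.') := by rintro ⟨-, hb⟩; exact hchd hb
            rw [if_neg this, if_neg h2]
          · have hiff : (c < m ∧ ch = '.') ↔ (c < m + 1 ∧ ch = '.') := by
              constructor
              · rintro ⟨ha, hb⟩; exact ⟨by omega, hb⟩
              · rintro ⟨ha, hb⟩
                refine ⟨?_, hb⟩
                rcases Nat.lt_succ_iff_lt_or_eq.1 ha with h | h
                · exact h
                · exact absurd h hcm
            split_ifs with hA hB hB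
            · rfl
            · exact absurd (hiff.1 hA) hB
            · exact absurd (hiff.2 hB) hA
            · rfl
      · rw [if_neg hrk, if_neg hrk]

lemma mapIdx_eq_self {α : Type} (l : List α) (f : Nat → α → α)
    (h : ∀ i (hi : i < l.length), f i (l[i]'hi) = l[i]'hi) : l.mapIdx f = l := by
  apply List.ext_getElem?
  intro i
  rw [List.getElem?_mapIdx]
  by_cases hi : i < l.length
  · rw [List.getElem?_eq_getElem hi]
    simp [h i hi]
  · simp [List.getElem?_eq_none (show l.length ≤ i by omega)]

lemma fmtStepA_spec (L : List (List Char)) (ds : List Nat) (k : Nat)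
    (hds : ∀ i, ds.getD i 0 = fmtDep L i) (hk : k < L.length)
    (hlen : ∀ r, fmtDep L r ≤ (L.getD r []).length) :
    fmtStepA ds L.length
      (L.mapIdx (fun r cs => if r < k then fmtSpecRow (fmtDep L) L.length r cs
                             else fmtPartRow (fmtDep L) L.length k r cs)) k
    = L.mapIdx (fun r cs => if r < k + 1 then fmtSpecRow (fmtDep L) L.length r cs
                            else fmtPartRow (fmtDep L) L.length (k + 1) r cs) := by
  set n := L.length with hn
  set dep := fmtDep L with hdep
  set G := L.mapIdx (fun r cs => if r < k then fmtSpecRow dep n r cs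
                                 else fmtPartRow dep n k r cs) with hG
  simp only [fmtStepA]
  rw [hds k]
  by_cases ht : dep k = 0
  · rw [if_pos ht]
    rw [List.mapIdx_eq_mapIdx_iff]
    intro r hr
    by_cases hrk : r < k
    · rw [if_pos hrk, if_pos (by omega)]
    · by_cases hrk2 : r = k
      · subst hrk2
        rw [if_neg hrk, if_pos (by omega)]
        unfold fmtSpecRow fmtPartRow
        rw [if_pos ht]
        apply mapIdx_eq_self
        intro c hc
        rw [if_neg]
        intro hcov
        have := fmtCovB_dep_lt _ _ _ _ _ hcov
        omega
      · rw [if_neg hrk, if_neg (by omega)]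
        unfold fmtPartRow
        rw [List.mapIdx_eq_mapIdx_iff]
        intro c hc
        have : fmtCovB dep n (k + 1) r c = fmtCovB dep n k r c := by
          rw [Bool.eq_iff_iff, fmtCovB_succ]
          constructor
          · rintro (h | ⟨-, hdk, -⟩)
            · exact h
            · omega
          · exact Or.inl
        rw [this]
  · rw [if_neg ht]
    set t := dep k with htt
    set ni := fmtNiA ds t k (List.range' (k + 1) (n - (k + 1))) with hni
    have ht1 : 1 ≤ t := by omega
    have hNiInt : k < ni → (ni < n ∧ dep ni = t ∧ ∀ j, k + 1 ≤ j → j < ni → t < dep j) := by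
      intro hlt
      obtain ⟨h1, h2, h3⟩ := fmtNiA_interior ds t k (n - (k + 1)) (k + 1) (by omega) hlt
      refine ⟨by omega, by rw [← hds]; exact h2, fun j hj1 hj2 => ?_⟩
      rw [← hds]
      exact h3 j hj1 hj2
    have hcovstep : ∀ r c, k < r →
        (fmtCovB dep n (k + 1) r c = true ↔
          (fmtCovB dep n k r c = true ∨ (c = t - 1 ∧ r < ni))) := by
      intro r c hkr
      rw [fmtCovB_succ]
      constructor
      · rintro (h | ⟨-, hdk, m, hmn, hrm, hdm, hall⟩)
        · exact Or.inl h
        · have hct : c = t - 1 := by omega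
          have hnim : ni = m := by
            rw [hni]
            apply fmtNiA_first ds t k (n - (k + 1)) (k + 1) m (by omega) (by omega)
              (by rw [hds]; omega)
            intro j hj1 hj2
            rw [hds]
            have := hall j hj2 (by omega)
            omega
          exact Or.inr ⟨hct, by omega⟩
      · rintro (h | ⟨hct, hrni⟩)
        · exact Or.inl h
        · have hkni : k < ni := by omega
          obtain ⟨h1, h2, h3⟩ := hNiInt hkni
          right
          refine ⟨hkr, by omega, ni, h1, hrni, by omega, fun j hj1 hj2 => ?_⟩
          have := h3 j (by omega) hj1
          omega
    apply List.ext_getElem?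
    intro r
    -- row k of g2
    have hg1k : (G.modify k (fun row => row.set (t - 1) '+'))[k]? =
        some ((fmtPartRow dep n k k (L[k]'hk)).set (t - 1) '+') := by
      rw [List.getElem?_modify, hG, List.getElem?_mapIdx, List.getElem?_eq_getElem hk]
      simp [Nat.lt_irrefl]
    have hg2k : (((List.range' (k + 1) (ni - (k + 1))).foldl
        (fun g j => g.modify j (fun row => row.set (t - 1) '|'))
        (G.modify k (fun row => row.set (t - 1) '+'))))[k]? =
        some ((fmtPartRow dep n k k (L[k]'hk)).set (t - 1) '+') := by
      rw [foldl_modify_getElem?, if_neg (by omega), hg1k]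
    rw [space_fold_getElem? k _ _ hg2k]
    rw [List.getElem?_mapIdx]
    by_cases hrk : r = k
    · rw [if_pos hrk, hrk, List.getElem?_eq_getElem hk]
      simp only [Option.map_some, Option.some.injEq]
      rw [if_pos (by omega)]
      -- spaceRow (t-1) ((P k k cs).set (t-1) '+') = specRow k cs
      set cs := L[k]'hk with hcs
      have hclen : t ≤ cs.length := by
        have := hlen k
        rw [List.getD_eq_getElem?_getD, List.getElem?_eq_getElem hk] at this
        exact this
      apply List.ext_getElem?
      intro c
      unfold fmtSpaceRow fmtSpecRow fmtPartRow
      rw [if_neg ht]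
      rw [List.getElem?_mapIdx, List.getElem?_set, List.getElem?_mapIdx, List.getElem?_mapIdx]
      by_cases hceq : t - 1 = c
      · rw [if_pos hceq, if_pos (by simp; omega)]
        rw [← hceq, List.getElem?_eq_getElem (by omega : t - 1 < cs.length)]
        simp only [Option.map_some, Option.some.injEq]
        rw [if_neg (by rintro ⟨h1, -⟩; omega)]
        rw [← htt, if_pos rfl]
      · -- c ≠ t - 1
        by_cases hcl : c < cs.length
        · rw [if_neg hceq, List.getElem?_eq_getElem hcl]
          simp only [Option.map_some, Option.some.injEq]
          rw [← htt]
          have hcovlt := fmtCovB_dep_lt dep n k k c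
          cases hcov : fmtCovB dep n k k c with
          | true =>
            have hlt := hcovlt hcov
            simp only [hcov, if_true]
            rw [if_neg (show ¬ (c < t - 1 ∧ '|' = '.') by rintro ⟨-, hx⟩; exact absurd hx (by decide))]
            rw [if_neg (show ¬ (c = t - 1) by omega), if_pos (show c < t - 1 by omega)]
          | false =>
            simp only [hcov, Bool.false_eq_true, if_false]
            rw [if_neg (show ¬ (c = t - 1) by omega)]
            by_cases hclt : c < t - 1
            · rw [if_pos hclt]
              by_cases hdot : cs[c] = '.'
              · rw [if_pos ⟨hclt, hdot⟩, if_pos hdot]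
              · rw [if_neg (show ¬ (c < t - 1 ∧ cs[c] = '.') by rintro ⟨-, hx⟩; exact hdot hx),
                  if_neg hdot]
            · rw [if_neg hclt,
                if_neg (show ¬ (c < t - 1 ∧ cs[c] = '.') by rintro ⟨hx, -⟩; exact hclt hx)]
        · rw [if_neg hceq, List.getElem?_eq_none (show cs.length ≤ c by omega)]
          rfl
    · -- r ≠ k : rows untouched by the space loop
      rw [if_neg hrk]
      rw [foldl_modify_getElem?, List.getElem?_modify, hG, List.getElem?_mapIdx]
      cases hLr : L[r]? with
      | none =>
        rw [if_neg]
        · simp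
        · rintro ⟨h1, h2⟩
          have := List.getElem?_eq_none_iff.1 hLr
          omega
      | some cs =>
        have hrlen : r < L.length := (List.getElem?_eq_some_iff.1 hLr).1
        have hkr' : ¬ (k = r) := fun h => hrk h.symm
        by_cases hrange : k + 1 ≤ r ∧ r < k + 1 + (ni - (k + 1))
        · -- k < r < ni : this row receives a '|' at column t-1
          have hkr : k < r := by omega
          have hrni : r < ni := by omega
          have hkni : k < ni := by omega
          obtain ⟨hninN, hdepni, hint⟩ := hNiInt hkni
          have hdepr : t < dep r := hint r (by omega) hrni
          have hcslen : t - 1 < cs.length := by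
            have h1 := hlen r
            rw [List.getD_eq_getElem?_getD, hLr] at h1
            simp only [Option.getD_some] at h1
            omega
          rw [if_pos hrange]
          simp only [Option.map_some]
          have hmap1 : (fun a => if k = r then a.set (t - 1) '+' else a) <$>
              (some (if r < k then fmtSpecRow dep n r cs else fmtPartRow dep n k r cs)) =
              some (if r < k then fmtSpecRow dep n r cs else fmtPartRow dep n k r cs) := by
            simp [hkr']
          rw [hmap1]
          simp only [Option.map_some, Option.some.injEq]
          rw [if_neg (show ¬ r < k by omega), if_neg (show ¬ r < k + 1 by omega)]
          apply List.ext_getElem?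
          intro c
          unfold fmtPartRow
          rw [List.getElem?_set, List.getElem?_mapIdx, List.getElem?_mapIdx]
          by_cases hceq : t - 1 = c
          · rw [if_pos hceq, if_pos (by simp [fmtPartRow]; omega), ← hceq,
              List.getElem?_eq_getElem hcslen]
            simp only [Option.map_some, Option.some.injEq]
            have : fmtCovB dep n (k + 1) r (t - 1) = true := by
              rw [hcovstep r (t - 1) hkr]
              exact Or.inr ⟨rfl, hrni⟩
            rw [this, if_pos rfl]
          · rw [if_neg hceq]
            cases hcc : cs[c]? with
            | none => simp
            | some ch =>
              simp only [Option.map_some, Option.some.injEq]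
              have : fmtCovB dep n (k + 1) r c = fmtCovB dep n k r c := by
                rw [Bool.eq_iff_iff, hcovstep r c hkr]
                constructor
                · rintro (h | ⟨h1, -⟩)
                  · exact h
                  · exact absurd h1.symm hceq
                · exact Or.inl
              rw [this]
        · rw [if_neg hrange]
          simp only [Option.map_some]
          have hmap1 : (fun a => if k = r then a.set (t - 1) '+' else a) <$>
              (some (if r < k then fmtSpecRow dep n r cs else fmtPartRow dep n k r cs)) =
              some (if r < k then fmtSpecRow dep n r cs else fmtPartRow dep n k r cs) := by
            simp [hkr']
          rw [hmap1]
          simp only [Option.some.injEq]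
          by_cases hrltk : r < k
          · rw [if_pos hrltk, if_pos (by omega)]
          · have hkr : k < r := by omega
            have hrni : ¬ r < ni := by omega
            rw [if_neg hrltk, if_neg (by omega : ¬ r < k + 1)]
            unfold fmtPartRow
            rw [List.mapIdx_eq_mapIdx_iff]
            intro c hc
            have : fmtCovB dep n (k + 1) r c = fmtCovB dep n k r c := by
              rw [Bool.eq_iff_iff, hcovstep r c hkr]
              constructor
              · rintro (h | ⟨-, h2⟩)
                · exact h
                · exact absurd h2 hrni
              · exact Or.inl
            rw [this]

lemma fmtCovB_zero (dep : Nat → Nat) (n r c : Nat) : fmtCovB dep n 0 r c = false := by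
  simp [fmtCovB]

lemma fmtFoldA (L : List (List Char)) (ds : List Nat)
    (hds : ∀ i, ds.getD i 0 = fmtDep L i)
    (hlen : ∀ r, fmtDep L r ≤ (L.getD r []).length) :
    (List.range L.length).foldl (fmtStepA ds L.length) L
    = L.mapIdx (fun r cs => fmtSpecRow (fmtDep L) L.length r cs) := by
  set n := L.length with hn
  set dep := fmtDep L with hdep
  have hbase : L = L.mapIdx (fun r cs => if r < 0 then fmtSpecRow dep n r cs
                                         else fmtPartRow dep n 0 r cs) := by
    symm
    apply mapIdx_eq_self
    intro r hr
    rw [if_neg (by omega)]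
    unfold fmtPartRow
    apply mapIdx_eq_self
    intro c hc
    rw [fmtCovB_zero]
    simp
  have hinv : ∀ k, k ≤ n →
      (List.range k).foldl (fmtStepA ds n) L
      = L.mapIdx (fun r cs => if r < k then fmtSpecRow dep n r cs
                              else fmtPartRow dep n k r cs) := by
    intro k
    induction k with
    | zero =>
      intro _
      simpa using hbase
    | succ k ih =>
      intro hk
      rw [List.range_succ, List.foldl_append, List.foldl_cons, List.foldl_nil]
      rw [ih (by omega)]
      exact fmtStepA_spec L ds k hds (by omega) hlen
  rw [hinv n (le_refl n)]
  rw [List.mapIdx_eq_mapIdx_iff]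
  intro r hr
  rw [if_pos (by omega)]

lemma fmtRowB_spec (L : List (List Char)) (ds : List Nat) (n : Nat)
    (hds : ∀ i, ds.getD i 0 = fmtDep L i) (j : Nat) (s : String)
    (hs : s.toList = L.getD j []) :
    fmtRowB ds n j s = String.ofList (fmtSpecRow (fmtDep L) n j s.toList) := by
  set dep := fmtDep L with hdep
  have hdj : ds.getD j 0 = dep j := hds j
  unfold fmtRowB fmtSpecRow
  rw [hdj]
  by_cases ht : dep j = 0
  · rw [if_pos ht, if_pos ht]
    exact (String.ofList_toList).symm
  · rw [if_neg ht, if_neg ht]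
    have ht0 : fmtDep L j = List.count '.' (L.getD j []) := by
      unfold fmtDep
      rw [if_neg (by intro hj0; rw [hdep] at ht; unfold fmtDep at ht; rw [if_pos hj0] at ht; omega)]
    have hclen : fmtDep L j ≤ s.toList.length := by
      rw [hs, ht0]
      exact List.count_le_length
    have htF : dep j = fmtDep L j := by rw [hdep]
    set t := dep j with htt
    set cs := s.toList with hcs
    refine congrArg String.ofList ?_
    apply List.ext_getElem?
    intro c
    rw [List.getElem?_mapIdx]
    by_cases hclt : c < t - 1
    · rw [List.getElem?_append_left (by simp [List.length_take]; omega)]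
      rw [List.getElem?_mapIdx, List.getElem?_take, if_pos hclt]
      cases hcc : cs[c]? with
      | none =>
        have := List.getElem?_eq_none_iff.1 hcc
        omega
      | some ch =>
        simp only [Option.map_some, Option.some.injEq]
        rw [fmtCovered_eq L ds n hds j c (by omega)]
        rw [if_neg (show ¬ c = t - 1 by omega), if_pos hclt]
    · by_cases hceq : c = t - 1
      · have hpre_len : ((cs.take (t - 1)).mapIdx
            (fun c ch => if fmtCovered ds n j c then '|' else if ch = '.' then ' ' else ch)).length = t - 1 := by
          simp [List.length_take]
          omega
        rw [List.getElem?_append_right (by omega)]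
        rw [hpre_len, hceq]
        simp only [Nat.sub_self, List.getElem?_cons_zero]
        rw [List.getElem?_eq_getElem (show t - 1 < cs.length by omega)]
        simp only [Option.map_some, Option.some.injEq]
        simp
      · -- c > t - 1
        have hpre_len : ((cs.take (t - 1)).mapIdx
            (fun c ch => if fmtCovered ds n j c then '|' else if ch = '.' then ' ' else ch)).length = t - 1 := by
          simp [List.length_take]
          omega
        rw [List.getElem?_append_right (by omega)]
        rw [hpre_len]
        have hsub : c - (t - 1) = (c - t) + 1 := by omega
        rw [hsub]
        simp only [List.getElem?_cons_succ]
        rw [List.getElem?_drop]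
        have hidx : t + (c - t) = c := by omega
        rw [hidx]
        cases hcc : cs[c]? with
        | none => simp
        | some ch =>
          simp only [Option.map_some, Option.some.injEq]
          rw [if_neg hceq, if_neg hclt]


-- ===== final assembly =====
lemma fmtDep_le_len (L : List (List Char)) (r : Nat) : fmtDep L r ≤ (L.getD r []).length := by
  unfold fmtDep
  split_ifs
  · omega
  · exact List.count_le_length

-- ===== VERDICT (by name: the statement is the Claim_ definition above) =====
theorem format_thread_view_spec : Claim_equal_format_thread_view := by
  unfold Claim_equal_format_thread_view Spec_format_thread_view
  intro tls _
  simp only [format_thread_view, format_thread_view_alt]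
  by_cases hn : tls.length = 0
  · rw [if_pos hn, if_pos hn]
  · rw [if_neg hn, if_neg hn]
    have htake : (tls ++ [""]).take tls.length = tls := by
      rw [List.take_append, List.take_length]
      simp
    rw [htake]
    set L := tls.map String.toList with hL
    have hLlen : tls.length = L.length := by rw [hL, List.length_map]
    rw [hLlen]
    have hds : ∀ i, (fmtDepthsA (tls ++ [""]) L.length).getD i 0 = fmtDep L i := by
      rw [← hLlen]
      exact fmtDepthsA_correct tls
    rw [fmtFoldA L _ hds (fmtDep_le_len L)]
    apply List.ext_getElem?
    intro j
    rw [List.getElem?_map, List.getElem?_mapIdx, List.getElem?_mapIdx, hL, List.getElem?_map]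
    cases hj : tls[j]? with
    | none => simp
    | some s =>
      simp only [Option.map_some, Option.some.injEq]
      have hs : s.toList = L.getD j [] := by
        rw [hL, getD_map_toList]
        have : tls.getD j "" = s := by
          rw [List.getD_eq_getElem?_getD, hj]
          rfl
        rw [this]
      have hdsB : ∀ i, ((0 : Nat) :: (tls.tail.map fmtDepthB)).getD i 0 = fmtDep L i := by
        intro i
        rw [hL]
        exact fmtDepthsB_correct tls i
      rw [fmtRowB_spec L _ L.length hdsB j s hs]
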